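-- pv_equiv track=rewrite | github.com/Moecker/samo_tidy | support/apply_linter.py | get_includes
-- ===== SOURCE A (Python) =====
-- def get_includes(lines):
--     clusters = []
--     clusters_idx = 0
--     clusters.append([])
--     for i, line in enumerate(lines):
--         if is_import(line):
--             clusters[clusters_idx].append((line, i))
--         if line == "\n":
--             clusters_idx += 1
--             clusters.append([])
--     return clusters
--
-- def is_import(line):
--     return line.startswith("from ") or line.startswith("import ")
-- ===== SOURCE B (Python) =====
-- def is_import(line):
--     return line.startswith("from ") or line.startswith("import ")
--
--
-- def get_includes(lines):
--     return _clusters(lines, 0)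
--
--
-- def _clusters(lines, base):
--     # split at the first blank line: head segment + recurse on the rest
--     if "\n" in lines:
--         k = lines.index("\n")
--         head = [(line, base + j) for j, line in enumerate(lines[:k]) if is_import(line)]
--         return [head] + _clusters(lines[k + 1:], base + k + 1)
--     return [[(line, base + j) for j, line in enumerate(lines) if is_import(line)]]
-- ===== Notes on version B (the rewrite author's own statement) =====
-- stated objective: alternative
-- what changed: Replaces A's single incremental pass (growing the last cluster and flushing on blank lines) with a recursive decomposition that finds the first blank line via index() and slices the list into a head segment (filtered for imports with offset-adjusted indices) plus a recursive tail.
import Mathlib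
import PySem

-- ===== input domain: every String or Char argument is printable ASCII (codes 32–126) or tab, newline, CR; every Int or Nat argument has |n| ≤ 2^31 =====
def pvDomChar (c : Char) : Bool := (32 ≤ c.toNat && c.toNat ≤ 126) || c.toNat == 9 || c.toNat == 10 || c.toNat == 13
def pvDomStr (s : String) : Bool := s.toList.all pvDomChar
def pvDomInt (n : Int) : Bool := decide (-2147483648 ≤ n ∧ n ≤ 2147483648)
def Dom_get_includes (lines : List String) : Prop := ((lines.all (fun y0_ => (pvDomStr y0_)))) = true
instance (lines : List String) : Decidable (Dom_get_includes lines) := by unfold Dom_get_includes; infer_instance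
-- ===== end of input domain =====

-- B re-implements A by recursively splitting at the first blank line (index + slices)
-- instead of A's single incremental pass; objective: alternative decomposition, same cost.

-- ===== PORT A =====
def is_import (line : String) : Bool :=
  PySem.Str.startswith line "from " || PySem.Str.startswith line "import "

-- the body of A's for-loop over enumerate(lines)
def stepA (st : List (List (String × Int)) × Nat) (p : Int × String) :
    List (List (String × Int)) × Nat :=
  let clusters := if is_import p.2 then st.1.modify st.2 (· ++ [(p.2, p.1)]) else st.1
  if p.2 = "\n" then (clusters ++ [[]], st.2 + 1) else (clusters, st.2)

def get_includes (lines : List String) : List (List (String × Int)) :=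
  ((PySem.List.enumerate lines 0).foldl stepA ([[]], 0)).1

-- ===== PORT B =====
-- "[(line, base + j) for j, line in enumerate(xs) if is_import(line)]"
def impsOf (base : Int) (xs : List String) : List (String × Int) :=
  (PySem.List.enumerate xs 0).filterMap
    (fun p => if is_import p.2 then some (p.2, base + p.1) else none)

-- '"\n" in lines' + 'lines.index("\n")' ported together as the option-valued first index
def pyClusters (lines : List String) (base : Int) : List (List (String × Int)) :=
  match h : PySem.List.index? lines "\n" with
  | some k =>
      impsOf base (PySem.List.slice lines none (some (k : Int)))
        :: pyClusters (PySem.List.slice lines (some ((k : Int) + 1)) none) (base + (k : Int) + 1)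
  | none => [impsOf base lines]
termination_by lines.length
decreasing_by
  obtain ⟨hk, -, -⟩ := PySem.List.getElem_of_index?_eq_some h
  have : ((k : Int) + 1) = ((k + 1 : Nat) : Int) := by push_cast; ring
  rw [this, PySem.List.slice_from_natCast]
  simp [List.length_drop]
  omega

def get_includes_alt (lines : List String) : List (List (String × Int)) :=
  pyClusters lines 0

-- ===== PRECONDITION & SPEC =====
def Spec_get_includes (lines : List String) (out : List (List (String × Int))) : Prop := out = get_includes_alt lines
instance (lines : List String) (out : List (List (String × Int))) : Decidable (Spec_get_includes lines out) := by unfold Spec_get_includes; infer_instance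

-- ===== CLAIM (what is proved, stated in full; the proofs are below) =====
def Claim_equal_get_includes : Prop := ∀ (lines : List String), Dom_get_includes lines → Spec_get_includes lines (get_includes lines)

-- ===== LEMMAS AND PROOFS =====

-- canonical recursive description of the clustering, shared target of both ports
def canon (lines : List String) (i : Int) : List (List (String × Int)) :=
  match lines with
  | [] => [[]]
  | l :: ls =>
    if l = "\n" then [] :: canon ls (i + 1)
    else if is_import l then
      match canon ls (i + 1) with
      | c :: cs => ((l, i) :: c) :: cs
      | [] => [[(l, i)]]
    else canon ls (i + 1)

def consHead (x : String × Int) : List (List (String × Int)) → List (List (String × Int))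
  | [] => [[x]]
  | c :: cs => (x :: c) :: cs

lemma canon_cons (l : String) (ls : List String) (i : Int) :
    canon (l :: ls) i =
      if l = "\n" then [] :: canon ls (i + 1)
      else if is_import l then consHead (l, i) (canon ls (i + 1))
      else canon ls (i + 1) := by
  show (if l = "\n" then [] :: canon ls (i + 1)
      else if is_import l then
        match canon ls (i + 1) with
        | c :: cs => ((l, i) :: c) :: cs
        | [] => [[(l, i)]]
      else canon ls (i + 1)) = _
  split_ifs with h1 h2
  · rfl
  · rcases h : canon ls (i + 1) with _ | ⟨c, cs⟩ <;> simp [consHead]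
  · rfl

lemma canon_ne_nil (ls : List String) (i : Int) : canon ls i ≠ [] := by
  cases ls with
  | nil => simp [canon]
  | cons l ls =>
    rw [canon_cons]
    split_ifs
    · simp
    · rcases h : canon ls (i + 1) with _ | ⟨c, cs⟩ <;> simp [consHead]
    · exact canon_ne_nil ls (i + 1)

def headApp (c : List (String × Int)) : List (List (String × Int)) → List (List (String × Int))
  | [] => [c]
  | d :: ds => (c ++ d) :: ds

lemma modify_append_len {α : Type} (cs : List α) (c : α) (f : α → α) :
    (cs ++ [c]).modify cs.length f = cs ++ [f c] := by
  induction cs with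
  | nil => simp [List.modify]
  | cons x xs ih => simpa [List.modify] using ih

lemma is_import_newline : is_import "\n" = false := by decide

lemma stepA_blank (st : List (List (String × Int)) × Nat) (i : Int) :
    stepA st (i, "\n") = (st.1 ++ [[]], st.2 + 1) := by
  simp [stepA, is_import_newline]

lemma stepA_imp (st : List (List (String × Int)) × Nat) (i : Int) (l : String)
    (hnl : l ≠ "\n") (himp : is_import l = true) :
    stepA st (i, l) = (st.1.modify st.2 (· ++ [(l, i)]), st.2) := by
  simp [stepA, hnl, himp]

lemma stepA_non (st : List (List (String × Int)) × Nat) (i : Int) (l : String)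
    (hnl : l ≠ "\n") (himp : is_import l = false) :
    stepA st (i, l) = st := by
  simp [stepA, hnl, himp]

lemma A_loop (ls : List String) (i : Int) (cs : List (List (String × Int)))
    (c : List (String × Int)) :
    ((PySem.List.enumerate ls i).foldl stepA (cs ++ [c], cs.length)).1
      = cs ++ headApp c (canon ls i) := by
  induction ls generalizing i cs c with
  | nil => simp [PySem.List.enumerate_nil, canon, headApp]
  | cons l ls ih =>
    rw [PySem.List.enumerate_cons, List.foldl_cons]
    by_cases hnl : l = "\n"
    · subst hnl
      rw [stepA_blank]
      have h1 : (cs ++ [c], cs.length).1 ++ [[]] = (cs ++ [c]) ++ [([] : List (String × Int))] := rfl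
      have h2 : (cs ++ [c], cs.length).2 + 1 = (cs ++ [c]).length := by simp
      rw [h1, h2, ih (i + 1) (cs ++ [c]) [], canon_cons, if_pos rfl]
      rcases hc : canon ls (i + 1) with _ | ⟨d, ds⟩
      · exact absurd hc (canon_ne_nil ls (i + 1))
      · simp [headApp]
    · by_cases himp : is_import l
      · rw [stepA_imp _ _ _ hnl himp]
        have h1 : (cs ++ [c], cs.length).1.modify (cs ++ [c], cs.length).2 (· ++ [(l, i)])
            = cs ++ [c ++ [(l, i)]] := modify_append_len cs c _
        rw [h1, ih (i + 1) cs (c ++ [(l, i)]), canon_cons, if_neg hnl, if_pos himp]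
        rcases hc : canon ls (i + 1) with _ | ⟨d, ds⟩
        · exact absurd hc (canon_ne_nil ls (i + 1))
        · simp [headApp, consHead]
      · rw [stepA_non _ _ _ hnl (by simpa using himp), ih (i + 1) cs c, canon_cons,
            if_neg hnl, if_neg himp]

lemma A_eq_canon (lines : List String) : get_includes lines = canon lines 0 := by
  have h := A_loop lines 0 [] []
  simp only [List.nil_append, List.length_nil] at h
  unfold get_includes stepA
  unfold stepA at h
  rw [h]
  rcases hc : canon lines 0 with _ | ⟨d, ds⟩
  · exact absurd hc (canon_ne_nil lines 0)
  · simp [headApp]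

lemma impsAux (xs : List String) (s b : Int) :
    (PySem.List.enumerate xs s).filterMap
        (fun p => if is_import p.2 then some (p.2, b + p.1) else none)
      = impsOf (b + s) xs := by
  induction xs generalizing s b with
  | nil => simp [impsOf, PySem.List.enumerate_nil]
  | cons l ls ih =>
    rw [PySem.List.enumerate_cons, List.filterMap_cons]
    unfold impsOf
    rw [PySem.List.enumerate_cons, List.filterMap_cons]
    rw [ih (s + 1) b, ih (0 + 1) (b + s)]
    have e1 : b + (s + 1) = (b + s) + (0 + 1) := by ring
    rw [e1]
    by_cases himp : is_import l <;> simp [himp]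

lemma impsOf_cons (b : Int) (l : String) (ls : List String) :
    impsOf b (l :: ls) = (if is_import l then [(l, b)] else []) ++ impsOf (b + 1) ls := by
  unfold impsOf
  rw [PySem.List.enumerate_cons, List.filterMap_cons, impsAux ls (0 + 1) b,
      impsAux ls 0 (b + 1)]
  by_cases himp : is_import l <;> simp [himp]

lemma canon_noblank (ls : List String) (b : Int) (h : "\n" ∉ ls) :
    canon ls b = [impsOf b ls] := by
  induction ls generalizing b with
  | nil => simp [canon, impsOf, PySem.List.enumerate_nil]
  | cons l ls ih =>
    have hnl : l ≠ "\n" := fun e => h (e ▸ List.mem_cons_self ..)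
    have hrest : "\n" ∉ ls := fun e => h (List.mem_cons_of_mem _ e)
    rw [impsOf_cons, canon_cons, if_neg hnl, ih (b + 1) hrest]
    by_cases himp : is_import l <;> simp [himp, consHead]

lemma canon_split (pre suf : List String) (b : Int) (h : "\n" ∉ pre) :
    canon (pre ++ "\n" :: suf) b
      = impsOf b pre :: canon suf (b + (pre.length : Int) + 1) := by
  induction pre generalizing b with
  | nil =>
    rw [List.nil_append, canon_cons, if_pos rfl]
    simp [impsOf, PySem.List.enumerate_nil]
  | cons l pre ih =>
    have hnl : l ≠ "\n" := fun e => h (e ▸ List.mem_cons_self ..)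
    have hpre : "\n" ∉ pre := fun e => h (List.mem_cons_of_mem _ e)
    have hlen : (((l :: pre).length : Nat) : Int) = (pre.length : Int) + 1 := by
      push_cast [List.length_cons]; ring
    rw [List.cons_append, canon_cons, if_neg hnl, ih (b + 1) hpre, impsOf_cons, hlen]
    have e : b + 1 + (pre.length : Int) + 1 = b + ((pre.length : Int) + 1) + 1 := by ring
    rw [e]
    by_cases himp : is_import l <;> simp [himp, consHead]

lemma pyClusters_none (ls : List String) (b : Int)
    (h : PySem.List.index? ls "\n" = none) : pyClusters ls b = [impsOf b ls] := by
  rw [pyClusters]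
  split
  · rename_i k heq; rw [h] at heq; cases heq
  · rfl

lemma pyClusters_some (ls : List String) (b : Int) (k : Nat)
    (h : PySem.List.index? ls "\n" = some k) :
    pyClusters ls b =
      impsOf b (PySem.List.slice ls none (some (k : Int)))
        :: pyClusters (PySem.List.slice ls (some ((k : Int) + 1)) none) (b + (k : Int) + 1) := by
  rw [pyClusters]
  split
  · rename_i k' heq; rw [h] at heq; injection heq with e; subst e; rfl
  · rename_i heq; rw [h] at heq; cases heq

lemma pyClusters_eq_canon (n : Nat) : ∀ (ls : List String) (b : Int), ls.length ≤ n →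
    pyClusters ls b = canon ls b := by
  induction n with
  | zero =>
    intro ls b hlen
    have hnil : ls = [] := List.eq_nil_of_length_eq_zero (Nat.le_zero.mp hlen)
    subst hnil
    rw [pyClusters_none _ _ ((PySem.List.index?_eq_none_iff _ _).mpr (by simp))]
    simp [canon, impsOf, PySem.List.enumerate_nil]
  | succ n ih =>
    intro ls b hlen
    rcases h : PySem.List.index? ls "\n" with _ | k
    · rw [pyClusters_none _ _ h, canon_noblank ls b ((PySem.List.index?_eq_none_iff _ _).mp h)]
    · obtain ⟨pre, suf, hsplit, hk, hpre⟩ := (PySem.List.index?_eq_some_iff _ _ _).mp h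
      subst hsplit; subst hk
      rw [pyClusters_some _ _ _ h]
      have hcast : ((pre.length : Int) + 1) = ((pre.length + 1 : Nat) : Int) := by
        push_cast; ring
      rw [PySem.List.slice_to_natCast, hcast, PySem.List.slice_from_natCast]
      have htake : (pre ++ "\n" :: suf).take pre.length = pre := by
        simp
      have hdrop : (pre ++ "\n" :: suf).drop (pre.length + 1) = suf := by simp
      rw [htake, hdrop, canon_split pre suf b hpre,
          ih suf (b + (pre.length : Int) + 1) (by simp at hlen; omega)]

-- ===== VERDICT (by name: the statement is the Claim_ definition above) =====
theorem get_includes_spec : Claim_equal_get_includes := by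
  intro lines _
  unfold Spec_get_includes get_includes_alt
  rw [A_eq_canon, pyClusters_eq_canon lines.length lines 0 le_rfl]
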